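-- pv_equiv track=rewrite | github.com/leowerneck/Tabulated_EOS_IllinoisGRMHD | nrpy_core/optical_depth_helpers.py | compute_all_ds
-- ===== SOURCE A (Python) =====
-- def index_shift(i=None,c="",s="1"):
--     """
--     Returns a string that describes the gridpoint
--     index, allowing for shifts.
--
--     Expected output:
--
--     index_shift():
--     "i0_i1_i2"
--
--     index_shift(0,"p"):
--     "i0p1_i1_i2"
--
--     index_shift(2,"m","half"):
--     "i0_i1_i2mhalf"
--     """
--     if c == "":
--         return "i0_i1_i2"
--     else:
--         if i == 0:
--             return "i0"+c+s+"_i1_i2"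
--         elif i == 1:
--             return "i0_i1"+c+s+"_i2"
--         else:
--             return "i0_i1_i2"+c+s
--
-- def compute_all_ds(indent="  "):
--     """
--     Returns a string that sets ds according to
--
--     ds = sqrt( gamma_{ii}dxx^{i}dxx^{i} ).
--
--     Expected output of compute_all_ds():
--
--     const REAL ds_i0phalf_i1_i2 = sqrt(dxx0*dxx0*gammaDD00_i0phalf_i1_i2);
--     const REAL ds_i0mhalf_i1_i2 = sqrt(dxx0*dxx0*gammaDD00_i0mhalf_i1_i2);
--     const REAL ds_i0_i1phalf_i2 = sqrt(dxx1*dxx1*gammaDD11_i0_i1phalf_i2);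
--     const REAL ds_i0_i1mhalf_i2 = sqrt(dxx1*dxx1*gammaDD11_i0_i1mhalf_i2);
--     const REAL ds_i0_i1_i2phalf = sqrt(dxx2*dxx2*gammaDD22_i0_i1_i2phalf);
--     const REAL ds_i0_i1_i2mhalf = sqrt(dxx2*dxx2*gammaDD22_i0_i1_i2mhalf);
--     """
--     string = ""
--     for i in range(3):
--         for c in ["p","m"]:
--             index = index_shift(i,c,"half")
--             string += indent+"const REAL "
--             string += "ds_"+index+" = sqrt(dxx"+str(i)+"*dxx"+str(i)+"*gammaDD"+str(i)+str(i)+"_"+index+");\n"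
--     return string
-- ===== SOURCE B (Python) =====
-- _DS_LINES = [
--     "const REAL ds_i0phalf_i1_i2 = sqrt(dxx0*dxx0*gammaDD00_i0phalf_i1_i2);\n",
--     "const REAL ds_i0mhalf_i1_i2 = sqrt(dxx0*dxx0*gammaDD00_i0mhalf_i1_i2);\n",
--     "const REAL ds_i0_i1phalf_i2 = sqrt(dxx1*dxx1*gammaDD11_i0_i1phalf_i2);\n",
--     "const REAL ds_i0_i1mhalf_i2 = sqrt(dxx1*dxx1*gammaDD11_i0_i1mhalf_i2);\n",
--     "const REAL ds_i0_i1_i2phalf = sqrt(dxx2*dxx2*gammaDD22_i0_i1_i2phalf);\n",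
--     "const REAL ds_i0_i1_i2mhalf = sqrt(dxx2*dxx2*gammaDD22_i0_i1_i2mhalf);\n",
-- ]
--
-- def compute_all_ds(indent="  "):
--     return "".join(indent + line for line in _DS_LINES)
-- ===== Notes on version B (the rewrite author's own statement) =====
-- stated objective: simpler
-- what changed: Replaced the nested 3x2 loop with index_shift string construction by a static table of the six line bodies and a single join that prefixes indent to each line.
import Mathlib
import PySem

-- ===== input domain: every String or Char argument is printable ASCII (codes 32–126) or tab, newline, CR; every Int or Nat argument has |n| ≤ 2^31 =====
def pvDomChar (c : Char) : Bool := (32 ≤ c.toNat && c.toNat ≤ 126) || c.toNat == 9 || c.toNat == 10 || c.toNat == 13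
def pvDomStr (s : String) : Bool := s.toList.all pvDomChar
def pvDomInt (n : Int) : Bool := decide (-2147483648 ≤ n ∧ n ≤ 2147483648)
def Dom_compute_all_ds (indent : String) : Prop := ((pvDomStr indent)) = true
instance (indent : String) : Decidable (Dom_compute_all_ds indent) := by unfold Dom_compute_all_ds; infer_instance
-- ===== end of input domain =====

-- B replaces A's nested 3x2 loop and index_shift helper by a static table of the six
-- line bodies joined with indent prefixed to each line (objective: simpler).

-- ===== PORT A =====
-- helper: literal transliteration of index_shift (defaults kept as explicit args)
def index_shift (i : Option Int) (c : String) (s : String) : String :=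
  if c = "" then "i0_i1_i2"
  else if i = some 0 then "i0" ++ c ++ s ++ "_i1_i2"
  else if i = some 1 then "i0_i1" ++ c ++ s ++ "_i2"
  else "i0_i1_i2" ++ c ++ s

def compute_all_ds (indent : String) : String :=
  (PySem.List.pyRange 0 3 1).foldl (fun string i =>
    (["p", "m"] : List String).foldl (fun string c =>
      let index := index_shift (some i) c "half"
      let string := string ++ (indent ++ "const REAL ")
      string ++ ("ds_" ++ index ++ " = sqrt(dxx" ++ PySem.Int.toStr i ++ "*dxx" ++
        PySem.Int.toStr i ++ "*gammaDD" ++ PySem.Int.toStr i ++ PySem.Int.toStr i ++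
        "_" ++ index ++ ");\n")) string) ""

-- ===== PORT B =====
def dsLines : List String :=
  [ "const REAL ds_i0phalf_i1_i2 = sqrt(dxx0*dxx0*gammaDD00_i0phalf_i1_i2);\n"
  , "const REAL ds_i0mhalf_i1_i2 = sqrt(dxx0*dxx0*gammaDD00_i0mhalf_i1_i2);\n"
  , "const REAL ds_i0_i1phalf_i2 = sqrt(dxx1*dxx1*gammaDD11_i0_i1phalf_i2);\n"
  , "const REAL ds_i0_i1mhalf_i2 = sqrt(dxx1*dxx1*gammaDD11_i0_i1mhalf_i2);\n"
  , "const REAL ds_i0_i1_i2phalf = sqrt(dxx2*dxx2*gammaDD22_i0_i1_i2phalf);\n"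
  , "const REAL ds_i0_i1_i2mhalf = sqrt(dxx2*dxx2*gammaDD22_i0_i1_i2mhalf);\n" ]

def compute_all_ds_alt (indent : String) : String :=
  PySem.Str.join "" (dsLines.map (fun line => indent ++ line))

-- ===== PRECONDITION & SPEC =====
def Spec_compute_all_ds (indent : String) (out : String) : Prop := out = compute_all_ds_alt indent
instance (indent : String) (out : String) : Decidable (Spec_compute_all_ds indent out) := by unfold Spec_compute_all_ds; infer_instance

-- ===== CLAIM (what is proved, stated in full; the proofs are below) =====
def Claim_equal_compute_all_ds : Prop := ∀ (indent : String), Dom_compute_all_ds indent → Spec_compute_all_ds indent (compute_all_ds indent)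

-- ===== LEMMAS AND PROOFS =====

-- ===== VERDICT (by name: the statement is the Claim_ definition above) =====
set_option maxRecDepth 4096 in
theorem compute_all_ds_spec : Claim_equal_compute_all_ds := by
  intro indent _
  unfold Spec_compute_all_ds compute_all_ds compute_all_ds_alt index_shift dsLines
  apply String.toList_injective
  simp [show PySem.List.pyRange 0 3 1 = ([0, 1, 2] : List Int) from rfl, List.foldl,
    PySem.Str.join, PySem.Int.toStr, String.toList_append, PySem.Chars.join, List.intercalate,
    show PySem.Int.toChars 0 = ['0'] from rfl, show PySem.Int.toChars 1 = ['1'] from rfl,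
    show PySem.Int.toChars 2 = ['2'] from rfl]
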